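-- pv_equiv track=rewrite | github.com/azerata/CTiB_Assignment_4 | Assignment_4.py | HMM_7_translate
-- ===== SOURCE A (Python) =====
-- def HMM_7_translate(sequence:str)->str:
--     o = []
--     c_streak = 0
--     r_streak = 0
--     for chr in sequence:
--         match chr:
--             case "N":
--                 o.append("3")
--                 c_streak = 0
--                 r_streak = 0
--             case "C":
--                 o.append(str(c_streak % 3))
--                 c_streak +=1
--                 r_streak = 0
--             case "R":
--                 o.append(str( (r_streak % 3) + 4 ))
--                 r_streak += 1
--                 c_streak = 0
--     return "".join(o)
-- ===== SOURCE B (Python) =====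
-- def HMM_7_translate(sequence: str) -> str:
--     # Keep only category characters: others neither emit nor break a streak.
--     seq = [ch for ch in sequence if ch in "NCR"]
--     out = []
--     i = 0
--     n = len(seq)
--     while i < n:
--         ch = seq[i]
--         j = i
--         while j < n and seq[j] == ch:
--             j += 1
--         length = j - i
--         if ch == "C":
--             out.append("".join(str(k % 3) for k in range(length)))
--         elif ch == "R":
--             out.append("".join(str(k % 3 + 4) for k in range(length)))
--         else:
--             out.append("3" * length)
--         i = j
--     return "".join(out)
-- ===== Notes on version B (the rewrite author's own statement) =====
-- stated objective: alternative
-- what changed: B filters the string to category characters and then processes it run by run (span/groupby-style), emitting each run's output from its length, instead of A's single character-at-a-time loop carrying two streak counters.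
import Mathlib
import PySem

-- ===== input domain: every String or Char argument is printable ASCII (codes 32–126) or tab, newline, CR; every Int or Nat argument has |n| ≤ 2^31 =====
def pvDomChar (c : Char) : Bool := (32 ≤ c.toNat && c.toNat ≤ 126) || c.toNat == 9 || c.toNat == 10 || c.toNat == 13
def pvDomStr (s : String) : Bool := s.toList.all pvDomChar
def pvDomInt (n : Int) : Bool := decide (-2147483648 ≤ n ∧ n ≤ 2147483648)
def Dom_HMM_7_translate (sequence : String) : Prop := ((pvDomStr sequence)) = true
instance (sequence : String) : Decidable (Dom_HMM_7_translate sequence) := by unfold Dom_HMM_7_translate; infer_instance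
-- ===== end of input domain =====

-- B processes the filtered sequence run by run instead of carrying streak counters; same cost, different decomposition.

-- ===== PORT A =====
-- one iteration of A's for-loop: state (o, c_streak, r_streak)
def HMM_7_stepA (st : List String × Int × Int) (ch : Char) : List String × Int × Int :=
  match st with
  | (o, c, r) =>
    if ch = 'N' then (o ++ ["3"], 0, 0)
    else if ch = 'C' then (o ++ [PySem.Int.toStr (PySem.Int.mod c 3)], c + 1, 0)
    else if ch = 'R' then (o ++ [PySem.Int.toStr (PySem.Int.mod r 3 + 4)], 0, r + 1)
    else (o, c, r)

def HMM_7_translate (sequence : String) : String :=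
  String.join (sequence.toList.foldl HMM_7_stepA ([], 0, 0)).1

-- ===== PORT B =====
def HMM_7_isNCR (ch : Char) : Bool := ch == 'N' || ch == 'C' || ch == 'R'

-- output for one maximal run of `len` copies of `ch`
def HMM_7_emitRun (ch : Char) (len : Nat) : String :=
  if ch = 'C' then String.join ((List.range len).map (fun k : Nat => PySem.Int.toStr (PySem.Int.mod (k : Int) 3)))
  else if ch = 'R' then String.join ((List.range len).map (fun k : Nat => PySem.Int.toStr (PySem.Int.mod (k : Int) 3 + 4)))
  else String.join (List.replicate len "3")

-- the run-by-run scan over the filtered character list (B's while loops as span/rest recursion)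
def HMM_7_runs : List Char → String
  | [] => ""
  | ch :: rest =>
    HMM_7_emitRun ch ((rest.takeWhile (· == ch)).length + 1) ++ HMM_7_runs (rest.dropWhile (· == ch))
termination_by l => l.length
decreasing_by
  simp only [List.length_cons]
  exact Nat.lt_succ_of_le (List.length_dropWhile_le _ _)

def HMM_7_translate_alt (sequence : String) : String :=
  HMM_7_runs (sequence.toList.filter HMM_7_isNCR)

-- ===== PRECONDITION & SPEC =====
def Spec_HMM_7_translate (sequence : String) (out : String) : Prop := out = HMM_7_translate_alt sequence
instance (sequence : String) (out : String) : Decidable (Spec_HMM_7_translate sequence out) := by unfold Spec_HMM_7_translate; infer_instance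

-- ===== CLAIM (what is proved, stated in full; the proofs are below) =====
def Claim_equal_HMM_7_translate : Prop := ∀ (sequence : String), Dom_HMM_7_translate sequence → Spec_HMM_7_translate sequence (HMM_7_translate sequence)

-- ===== LEMMAS AND PROOFS =====

-- tail-form of A's loop: the string A will have produced from the remaining list, given current streaks
def HMM_7_F : Int → Int → List Char → String
  | _, _, [] => ""
  | c, r, ch :: t =>
    if ch = 'N' then "3" ++ HMM_7_F 0 0 t
    else if ch = 'C' then PySem.Int.toStr (PySem.Int.mod c 3) ++ HMM_7_F (c + 1) 0 t
    else if ch = 'R' then PySem.Int.toStr (PySem.Int.mod r 3 + 4) ++ HMM_7_F 0 (r + 1) t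
    else HMM_7_F c r t

theorem HMM_7_foldl_append (l : List String) (a : String) :
    l.foldl (· ++ ·) a = a ++ l.foldl (· ++ ·) "" := by
  induction l generalizing a with
  | nil => simp
  | cons s t ih =>
    simp only [List.foldl_cons]
    rw [ih (a ++ s), ih ("" ++ s)]
    simp [String.append_assoc]

theorem HMM_7_join_cons (s : String) (l : List String) :
    String.join (s :: l) = s ++ String.join l := by
  simp only [String.join, List.foldl_cons]
  have := HMM_7_foldl_append l s
  simpa using this

theorem HMM_7_join_snoc (l : List String) (s : String) :
    String.join (l ++ [s]) = String.join l ++ s := by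
  simp [String.join, List.foldl_append]

theorem HMM_7_A_eq_F (l : List Char) (acc : List String) (c r : Int) :
    String.join ((l.foldl HMM_7_stepA (acc, c, r)).1) = String.join acc ++ HMM_7_F c r l := by
  induction l generalizing acc c r with
  | nil => simp [HMM_7_F]
  | cons ch t ih =>
    simp only [List.foldl_cons, HMM_7_stepA, HMM_7_F]
    by_cases h1 : ch = 'N'
    · simp [h1, ih, HMM_7_join_snoc, String.append_assoc]
    · by_cases h2 : ch = 'C'
      · simp [h1, h2, ih, HMM_7_join_snoc, String.append_assoc]
      · by_cases h3 : ch = 'R'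
        · simp [h1, h2, h3, ih, HMM_7_join_snoc, String.append_assoc]
        · simp [h1, h2, h3, ih]

theorem HMM_7_F_filter (c r : Int) (l : List Char) :
    HMM_7_F c r l = HMM_7_F c r (l.filter HMM_7_isNCR) := by
  induction l generalizing c r with
  | nil => rfl
  | cons ch t ih =>
    by_cases h1 : ch = 'N'
    · simp [HMM_7_F, List.filter, HMM_7_isNCR, h1, ih]
    · by_cases h2 : ch = 'C'
      · simp [HMM_7_F, List.filter, HMM_7_isNCR, h1, h2, ih]
      · by_cases h3 : ch = 'R'
        · simp [HMM_7_F, List.filter, HMM_7_isNCR, h1, h2, h3, ih]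
        · have hb : HMM_7_isNCR ch = false := by simp [HMM_7_isNCR, h1, h2, h3]
          simp [HMM_7_F, List.filter_cons, hb, h1, h2, h3, ih]

-- streak resets: if the next character is a category character other than 'C', c_streak is irrelevant
theorem HMM_7_resetC (c r : Int) (t : List Char) (hall : ∀ x ∈ t, HMM_7_isNCR x = true)
    (hhd : ∀ a, t.head? = some a → a ≠ 'C') :
    HMM_7_F c r t = HMM_7_F 0 r t := by
  cases t with
  | nil => rfl
  | cons a t' =>
    have ha := hhd a rfl
    have := hall a (by simp)
    simp only [HMM_7_isNCR, Bool.or_eq_true, beq_iff_eq] at this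
    rcases this with (h | h) | h
    · simp [HMM_7_F, h]
    · exact absurd h ha
    · simp [HMM_7_F, h]

theorem HMM_7_resetR (c r : Int) (t : List Char) (hall : ∀ x ∈ t, HMM_7_isNCR x = true)
    (hhd : ∀ a, t.head? = some a → a ≠ 'R') :
    HMM_7_F c r t = HMM_7_F c 0 t := by
  cases t with
  | nil => rfl
  | cons a t' =>
    have ha := hhd a rfl
    have := hall a (by simp)
    simp only [HMM_7_isNCR, Bool.or_eq_true, beq_iff_eq] at this
    rcases this with (h | h) | h
    · simp [HMM_7_F, h]
    · simp [HMM_7_F, h]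
    · exact absurd h ha

theorem HMM_7_run_N (n : Nat) (t : List Char) :
    HMM_7_F 0 0 (List.replicate n 'N' ++ t) = String.join (List.replicate n "3") ++ HMM_7_F 0 0 t := by
  induction n with
  | zero => simp [String.join]
  | succ m ih => simp [List.replicate_succ, HMM_7_F, ih, HMM_7_join_cons, String.append_assoc]

theorem HMM_7_run_C (n : Nat) (c : Int) (t : List Char) :
    HMM_7_F c 0 (List.replicate n 'C' ++ t)
      = String.join ((List.range n).map (fun k : Nat => PySem.Int.toStr (PySem.Int.mod (c + (k : Int)) 3)))
        ++ HMM_7_F (c + n) 0 t := by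
  induction n generalizing c with
  | zero => simp [String.join]
  | succ m ih =>
    rw [List.replicate_succ, List.cons_append]
    rw [show HMM_7_F c 0 ('C' :: (List.replicate m 'C' ++ t))
          = PySem.Int.toStr (PySem.Int.mod c 3) ++ HMM_7_F (c + 1) 0 (List.replicate m 'C' ++ t)
        from by simp [HMM_7_F]]
    rw [ih (c + 1), List.range_succ_eq_map, List.map_cons, List.map_map, HMM_7_join_cons]
    have h1 : ((fun k : Nat => PySem.Int.toStr (PySem.Int.mod (c + (k : Int)) 3)) ∘ Nat.succ)
        = (fun k : Nat => PySem.Int.toStr (PySem.Int.mod (c + 1 + (k : Int)) 3)) := by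
      funext k
      simp only [Function.comp]
      congr 2
      push_cast
      ring
    rw [h1]
    have h2 : c + 1 + (m : Int) = c + ((m + 1 : Nat) : Int) := by push_cast; ring
    simp [h2, String.append_assoc]

theorem HMM_7_run_R (n : Nat) (r : Int) (t : List Char) :
    HMM_7_F 0 r (List.replicate n 'R' ++ t)
      = String.join ((List.range n).map (fun k : Nat => PySem.Int.toStr (PySem.Int.mod (r + (k : Int)) 3 + 4)))
        ++ HMM_7_F 0 (r + n) t := by
  induction n generalizing r with
  | zero => simp [String.join]
  | succ m ih =>
    rw [List.replicate_succ, List.cons_append]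
    rw [show HMM_7_F 0 r ('R' :: (List.replicate m 'R' ++ t))
          = PySem.Int.toStr (PySem.Int.mod r 3 + 4) ++ HMM_7_F 0 (r + 1) (List.replicate m 'R' ++ t)
        from by simp [HMM_7_F]]
    rw [ih (r + 1), List.range_succ_eq_map, List.map_cons, List.map_map, HMM_7_join_cons]
    have h1 : ((fun k : Nat => PySem.Int.toStr (PySem.Int.mod (r + (k : Int)) 3 + 4)) ∘ Nat.succ)
        = (fun k : Nat => PySem.Int.toStr (PySem.Int.mod (r + 1 + (k : Int)) 3 + 4)) := by
      funext k
      simp only [Function.comp]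
      congr 3
      push_cast
      ring
    rw [h1]
    have h2 : r + 1 + (m : Int) = r + ((m + 1 : Nat) : Int) := by push_cast; ring
    simp [h2, String.append_assoc]

theorem HMM_7_dropWhile_head (p : Char → Bool) (l : List Char) :
    ∀ a, (l.dropWhile p).head? = some a → p a = false := by
  induction l with
  | nil => intro a h; simp [List.dropWhile] at h
  | cons b t ih =>
    intro a h
    by_cases hb : p b = true
    · rw [List.dropWhile_cons_of_pos hb] at h
      exact ih a h
    · rw [List.dropWhile_cons_of_neg hb] at h
      simp at h
      subst h
      simpa using hb

theorem HMM_7_F_eq_runs (n : Nat) :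
    ∀ l : List Char, l.length ≤ n → (∀ x ∈ l, HMM_7_isNCR x = true) →
      HMM_7_F 0 0 l = HMM_7_runs l := by
  induction n with
  | zero =>
    intro l hl _
    have hnil : l = [] := List.eq_nil_of_length_eq_zero (Nat.le_zero.mp hl)
    subst hnil
    simp [HMM_7_runs, HMM_7_F]
  | succ m ih =>
    intro l hl hall
    cases l with
    | nil => simp [HMM_7_runs, HMM_7_F]
    | cons ch rest =>
      have htk : rest.takeWhile (· == ch) = List.replicate (rest.takeWhile (· == ch)).length ch := by
        rw [List.eq_replicate_iff]
        refine ⟨rfl, fun b hb => ?_⟩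
        have := List.mem_takeWhile_imp hb
        simpa using this
      have hsplit : ch :: rest
          = List.replicate ((rest.takeWhile (· == ch)).length + 1) ch ++ rest.dropWhile (· == ch) := by
        rw [List.replicate_succ, List.cons_append]
        congr 1
        conv_lhs => rw [← List.takeWhile_append_dropWhile (p := (· == ch)) (l := rest)]
        rw [← htk]
      have hall' : ∀ x ∈ rest.dropWhile (· == ch), HMM_7_isNCR x = true := fun x hx =>
        hall x (List.mem_cons_of_mem _ ((List.dropWhile_sublist _).mem hx))
      have hlen : (rest.dropWhile (· == ch)).length ≤ m :=
        Nat.le_trans (List.length_dropWhile_le _ _) (Nat.le_of_succ_le_succ (by simpa using hl))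
      have hrec : HMM_7_F 0 0 (rest.dropWhile (· == ch)) = HMM_7_runs (rest.dropWhile (· == ch)) :=
        ih _ hlen hall'
      rw [HMM_7_runs]
      have hch := hall ch (by simp)
      simp only [HMM_7_isNCR, Bool.or_eq_true, beq_iff_eq] at hch
      rcases hch with (hN | hC) | hR
      · subst hN
        rw [hsplit, HMM_7_run_N, hrec, HMM_7_emitRun]
        simp
      · subst hC
        rw [hsplit, HMM_7_run_C]
        have hres : HMM_7_F (0 + ((rest.takeWhile (· == 'C')).length + 1 : Nat)) 0 (rest.dropWhile (· == 'C'))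
            = HMM_7_F 0 0 (rest.dropWhile (· == 'C')) := by
          apply HMM_7_resetC _ _ _ hall'
          intro a ha hac
          have := HMM_7_dropWhile_head (· == 'C') rest a ha
          simp [hac] at this
        rw [hres, hrec, HMM_7_emitRun]
        simp
      · subst hR
        rw [hsplit, HMM_7_run_R]
        have hres : HMM_7_F 0 (0 + ((rest.takeWhile (· == 'R')).length + 1 : Nat)) (rest.dropWhile (· == 'R'))
            = HMM_7_F 0 0 (rest.dropWhile (· == 'R')) := by
          apply HMM_7_resetR _ _ _ hall'
          intro a ha har
          have := HMM_7_dropWhile_head (· == 'R') rest a ha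
          simp [har] at this
        rw [hres, hrec, HMM_7_emitRun]
        simp

theorem HMM_7_main (s : String) : HMM_7_translate s = HMM_7_translate_alt s := by
  unfold HMM_7_translate HMM_7_translate_alt
  rw [HMM_7_A_eq_F, HMM_7_F_filter]
  have hall : ∀ x ∈ s.toList.filter HMM_7_isNCR, HMM_7_isNCR x = true := fun x hx =>
    List.of_mem_filter hx
  rw [HMM_7_F_eq_runs (s.toList.filter HMM_7_isNCR).length _ (Nat.le_refl _) hall]
  simp [String.join]

-- ===== VERDICT (by name: the statement is the Claim_ definition above) =====
theorem HMM_7_translate_spec : Claim_equal_HMM_7_translate := by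
  intro s _
  unfold Spec_HMM_7_translate
  exact HMM_7_main s
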